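-- pv_equiv track=rewrite | github.com/w40141/verilog | clefia/work/attack.py | compare_li
-- ===== SOURCE A (Python) =====
-- def compare_li(reg_li, s, n):
--     series_li = []
--     e = s + n
--     for i, src_reg in enumerate(reg_li):
--         for j, dst_reg in enumerate(reg_li):
--             if i != j:
--                 if src_reg[s:e] == dst_reg[s + 1:e + 1]:
--                     series_li.append([i, j])
--     return series_li
-- ===== SOURCE B (Python) =====
-- def compare_li(reg_li, s, n):
--     e = s + n
--     index = {}
--     for j, dst_reg in enumerate(reg_li):
--         index.setdefault(dst_reg[s + 1:e + 1], []).append(j)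
--     series_li = []
--     for i, src_reg in enumerate(reg_li):
--         for j in index.get(src_reg[s:e], []):
--             if j != i:
--                 series_li.append([i, j])
--     return series_li
-- ===== Notes on version B (the rewrite author's own statement) =====
-- stated objective: alternative
-- what changed: Replaces the quadratic all-pairs slice comparison by a single pass that groups indices in a dict keyed by reg[s+1:e+1], then one lookup per i, removing the inner scan (O(n*L + output); the output itself can be quadratic, so no overall speed is claimed).
import Mathlib
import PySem

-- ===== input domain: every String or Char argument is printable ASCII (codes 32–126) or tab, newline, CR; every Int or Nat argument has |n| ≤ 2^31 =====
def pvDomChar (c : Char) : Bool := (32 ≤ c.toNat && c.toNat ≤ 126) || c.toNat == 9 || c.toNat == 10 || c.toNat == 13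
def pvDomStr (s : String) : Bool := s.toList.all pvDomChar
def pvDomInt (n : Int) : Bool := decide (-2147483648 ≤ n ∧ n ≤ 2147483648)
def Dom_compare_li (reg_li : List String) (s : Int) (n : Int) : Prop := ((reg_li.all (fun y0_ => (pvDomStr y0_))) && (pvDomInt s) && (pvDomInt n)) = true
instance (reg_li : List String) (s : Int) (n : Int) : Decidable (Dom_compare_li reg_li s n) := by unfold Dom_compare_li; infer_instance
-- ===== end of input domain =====

-- B replaces A's all-pairs slice comparison by a dict grouping indices under the
-- key reg[s+1:e+1] built in one pass, then one lookup per i (objective: alternative).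

-- ===== PORT A =====
def compare_li (reg_li : List String) (s : Int) (n : Int) : List (List Int) :=
  let e := s + n
  (PySem.List.enumerate reg_li).foldl (fun series_li p =>
    (PySem.List.enumerate reg_li).foldl (fun series_li q =>
      if p.1 ≠ q.1 then
        if PySem.Str.slice p.2 (some s) (some e) = PySem.Str.slice q.2 (some (s + 1)) (some (e + 1))
          then series_li ++ [[p.1, q.1]]
          else series_li
      else series_li) series_li) []

-- ===== PORT B =====
def compare_li_alt (reg_li : List String) (s : Int) (n : Int) : List (List Int) :=
  let e := s + n
  let index : PySem.Dict String (List Int) :=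
    (PySem.List.enumerate reg_li).foldl (fun d q =>
      d.modify (PySem.Str.slice q.2 (some (s + 1)) (some (e + 1))) [] (· ++ [q.1]))
      PySem.Dict.empty
  (PySem.List.enumerate reg_li).foldl (fun series_li p =>
    series_li ++
      ((index.getD (PySem.Str.slice p.2 (some s) (some e)) []).filter (fun j => j ≠ p.1)).map
        (fun j => [p.1, j])) []

-- ===== PRECONDITION & SPEC =====
def Spec_compare_li (reg_li : List String) (s : Int) (n : Int) (out : List (List Int)) : Prop := out = compare_li_alt reg_li s n
instance (reg_li : List String) (s : Int) (n : Int) (out : List (List Int)) : Decidable (Spec_compare_li reg_li s n out) := by unfold Spec_compare_li; infer_instance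

-- ===== CLAIM (what is proved, stated in full; the proofs are below) =====
def Claim_equal_compare_li : Prop := ∀ (reg_li : List String) (s : Int) (n : Int), Dom_compare_li reg_li s n → Spec_compare_li reg_li s n (compare_li reg_li s n)

-- ===== LEMMAS AND PROOFS =====

-- A's inner loop over any pair list, rewritten as B's map-over-filtered-group.
theorem pv_inner (l : List (Int × String)) (i : Int) (k : String) (keyB : String → String)
    (acc : List (List Int)) :
    l.foldl (fun series_li q =>
      if i ≠ q.1 then
        if k = keyB q.2 then series_li ++ [[i, q.1]] else series_li
      else series_li) acc
    = acc ++ ((((l.map (fun q => (keyB q.2, q.1))).filter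
          (fun p => p.1 == k)).map (·.2)).filter (fun j => j ≠ i)).map
        (fun j => [i, j]) := by
  induction l generalizing acc with
  | nil => simp
  | cons q rest ih =>
    simp only [List.foldl_cons, List.map_cons, List.filter_cons]
    by_cases hne : i ≠ q.1
    · by_cases hk : k = keyB q.2
      · have hb : (keyB q.2 == k) = true := by simp [hk]
        have hji : q.1 ≠ i := Ne.symm hne
        rw [if_pos hne, if_pos hk, ih]
        simp [hb, hji, List.append_assoc]
      · have hb : (keyB q.2 == k) = false := by simp [Ne.symm hk]
        rw [if_pos hne, if_neg hk, ih]
        simp [hb]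
    · rw [if_neg hne, ih]
      have heq : q.1 = i := (not_not.mp hne).symm
      by_cases hk : (keyB q.2 == k) = true
      · simp [hk, heq]
      · simp [hk]

-- ===== VERDICT (by name: the statement is the Claim_ definition above) =====
theorem compare_li_spec : Claim_equal_compare_li := by
  intro reg_li s n _
  unfold Spec_compare_li compare_li compare_li_alt
  simp only []
  set e := s + n with he
  set keyB : String → String := fun t => PySem.Str.slice t (some (s + 1)) (some (e + 1)) with hkB
  set kA : String → String := fun t => PySem.Str.slice t (some s) (some e) with hkA
  -- the dict lookup is the ordered group of matching indices
  have hidx : ∀ (k : String),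
      (((PySem.List.enumerate reg_li).foldl (fun d q =>
          d.modify (keyB q.2) [] (· ++ [q.1])) PySem.Dict.empty).getD k [])
      = (((PySem.List.enumerate reg_li).map (fun q => (keyB q.2, q.1))).filter
          (fun p => p.1 == k)).map (·.2) := by
    intro k
    have hfold := (List.foldl_map (f := fun (q : Int × String) => (keyB q.2, q.1))
      (g := fun (d : PySem.Dict String (List Int)) (p : String × Int) => d.modify p.1 [] (· ++ [p.2]))
      (l := PySem.List.enumerate reg_li) (init := PySem.Dict.empty)).symm
    simp only [] at hfold
    rw [hfold, PySem.Dict.getD_foldl_modify_append]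
    simp [PySem.Dict.getD, PySem.Dict.get?, PySem.Dict.empty]
  -- the two outer folds have pointwise-equal step functions
  have hstep : (fun (series_li : List (List Int)) (p : Int × String) =>
      (PySem.List.enumerate reg_li).foldl (fun series_li q =>
        if p.1 ≠ q.1 then
          if kA p.2 = keyB q.2 then series_li ++ [[p.1, q.1]] else series_li
        else series_li) series_li)
      = (fun (series_li : List (List Int)) (p : Int × String) =>
        series_li ++
          (((((PySem.List.enumerate reg_li).foldl (fun d q =>
              d.modify (keyB q.2) [] (· ++ [q.1])) PySem.Dict.empty).getD (kA p.2) []).filter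
            (fun j => j ≠ p.1)).map (fun j => [p.1, j]))) := by
    funext series_li p
    rw [pv_inner (PySem.List.enumerate reg_li) p.1 (kA p.2) keyB series_li, hidx (kA p.2)]
  rw [hstep]
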